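-- pv_equiv track=rewrite | github.com/songwell1024/AndroidRepackageDetection | DynamicMethod/UISimlarityCompare/GetTreePath.py | removeLastIntegerNumber
-- ===== SOURCE A (Python) =====
-- def removeLastIntegerNumber(node_str):
--     list_str = list(node_str)
--     for i in range(node_str.__len__() -1, -1, -1):
--         if list_str[i] >= "0"  and list_str[i] <= "9":
--             list_str.pop(i)
--         else:
--             break
--     node_str = ''.join([str(x) for x in list_str])
--     return node_str
-- ===== SOURCE B (Python) =====
-- def removeLastIntegerNumber(node_str):
--     keep = 0
--     for i, c in enumerate(node_str):
--         if c < '0' or c > '9':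
--             keep = i + 1
--     return node_str[:keep]
-- ===== Notes on version B (the rewrite author's own statement) =====
-- stated objective: alternative
-- what changed: Instead of scanning right-to-left and popping trailing digits from a list copy, B makes one left-to-right pass recording the index after the last non-digit character and returns a single prefix slice up to it.
import Mathlib
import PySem

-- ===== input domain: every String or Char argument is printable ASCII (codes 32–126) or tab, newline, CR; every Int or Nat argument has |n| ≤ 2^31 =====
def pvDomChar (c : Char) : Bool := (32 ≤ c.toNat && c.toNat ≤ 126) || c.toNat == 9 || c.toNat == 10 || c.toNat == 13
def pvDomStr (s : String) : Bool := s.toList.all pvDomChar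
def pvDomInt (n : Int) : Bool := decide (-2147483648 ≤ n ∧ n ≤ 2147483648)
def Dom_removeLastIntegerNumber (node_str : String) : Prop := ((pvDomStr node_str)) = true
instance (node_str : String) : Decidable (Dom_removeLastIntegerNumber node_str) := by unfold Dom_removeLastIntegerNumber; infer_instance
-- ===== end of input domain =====

-- ===== PORT A =====
-- B replaces A's right-to-left pop-from-a-list-copy loop by a single forward pass that records
-- the index after the last non-digit character and returns one prefix slice (alternative, same cost).
-- go: the 'for i in range(len-1, -1, -1)' loop over list_str, popping at i while the char is a digit, 'break' otherwise
def removeLastIntegerNumber.go : List Int → List Char → List Char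
  | [], ls => ls
  | i :: is, ls =>
    match PySem.List.pyGet? ls i with
    | none => ls          -- IndexError (unreachable for this loop's indices)
    | some c =>
      if '0' ≤ c ∧ c ≤ '9' then
        match PySem.List.pop? ls i with
        | none => ls
        | some (_, ls') => removeLastIntegerNumber.go is ls'
      else ls              -- break

def removeLastIntegerNumber (node_str : String) : String :=
  let list_str := node_str.toList
  let list_str := removeLastIntegerNumber.go
      (PySem.List.pyRange ((PySem.Str.len node_str : Int) - 1) (-1) (-1)) list_str
  String.ofList (list_str.map (fun x => x))   -- ''.join([str(x) for x in list_str]); str(c) of a 1-char string is itself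

-- ===== PORT B =====
-- forward pass: keep = index after the last non-digit seen so far; result is node_str[:keep]
def removeLastIntegerNumber_alt (node_str : String) : String :=
  let keep : Int := (PySem.List.enumerate node_str.toList).foldl
      (fun keep ic => if ic.2 < '0' ∨ '9' < ic.2 then ic.1 + 1 else keep) 0
  String.ofList (PySem.List.slice node_str.toList none (some keep))

-- ===== PRECONDITION & SPEC =====
def Spec_removeLastIntegerNumber (node_str : String) (out : String) : Prop := out = removeLastIntegerNumber_alt node_str
instance (node_str : String) (out : String) : Decidable (Spec_removeLastIntegerNumber node_str out) := by unfold Spec_removeLastIntegerNumber; infer_instance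

-- ===== CLAIM (what is proved, stated in full; the proofs are below) =====
def Claim_equal_removeLastIntegerNumber : Prop := ∀ (node_str : String), Dom_removeLastIntegerNumber node_str → Spec_removeLastIntegerNumber node_str (removeLastIntegerNumber node_str)

-- ===== LEMMAS AND PROOFS =====

theorem range_succ_cons (n : Nat) : List.range (n+1) = 0 :: (List.range n).map (·+1) := by
  rw [List.range_eq_range', List.range'_succ, List.range_eq_range']
  congr 1
  rw [List.range'_eq_map_range]
  simp only [List.range_eq_range']
  apply List.map_congr_left
  intro a _
  omega

theorem pyRange_countdown_cons (a : Int) (ha : 0 ≤ a) :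
    PySem.List.pyRange a (-1) (-1) = a :: PySem.List.pyRange (a - 1) (-1) (-1) := by
  have h1 : (a - (-1)).toNat = a.toNat + 1 := by omega
  have h2 : (a - 1 - (-1)).toNat = a.toNat := by omega
  rw [PySem.List.pyRange_neg_one, PySem.List.pyRange_neg_one, h1, h2, range_succ_cons]
  simp only [List.map_cons, List.map_map]
  refine List.cons_eq_cons.mpr ⟨by simp, ?_⟩
  apply List.map_congr_left
  intro k _
  simp only [Function.comp_apply]
  push_cast
  omega

theorem eraseIdx_concat_length {α : Type} (ys : List α) (y : α) :
    (ys ++ [y]).eraseIdx ys.length = ys := by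
  induction ys with
  | nil => simp
  | cons x xs ih => simp [ih]

-- A's loop strips the trailing run of ASCII digits
theorem go_eq_rstrip (ls : List Char) :
    removeLastIntegerNumber.go (PySem.List.pyRange ((ls.length : Int) - 1) (-1) (-1)) ls
      = (ls.reverse.dropWhile (fun c => decide ('0' ≤ c ∧ c ≤ '9'))).reverse := by
  induction ls using List.reverseRecOn with
  | nil =>
    have : PySem.List.pyRange ((([] : List Char).length : Int) - 1) (-1) (-1) = [] := by decide
    rw [this]
    rfl
  | append_singleton ys y ih =>
    have hlen : ((ys ++ [y]).length : Int) - 1 = (ys.length : Int) := by simp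
    rw [hlen, pyRange_countdown_cons _ (by positivity)]
    show removeLastIntegerNumber.go (((ys.length : Int)) :: _) (ys ++ [y]) = _
    unfold removeLastIntegerNumber.go
    have hget : PySem.List.pyGet? (ys ++ [y]) ((ys.length : Int)) = some y := by
      rw [PySem.List.pyGet?_natCast]
      simp
    rw [hget]
    dsimp only
    rw [List.reverse_append, List.reverse_singleton, List.singleton_append]
    by_cases hy : ('0' ≤ y ∧ y ≤ '9')
    · rw [if_pos hy]
      have hpop : PySem.List.pop? (ys ++ [y]) ((ys.length : Int)) =
          some ((ys ++ [y])[ys.length]'(by simp), (ys ++ [y]).eraseIdx ys.length) :=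
        PySem.List.pop?_natCast _ _ (by simp)
      rw [hpop, eraseIdx_concat_length]
      dsimp only
      rw [ih]
      rw [List.dropWhile_cons, if_pos (by simpa using hy)]
    · rw [if_neg hy]
      rw [List.dropWhile_cons, if_neg (by simpa using hy)]
      rw [List.reverse_cons, List.reverse_reverse]

-- B's accumulator after processing the whole list
def keepOf (ls : List Char) : Int :=
  (PySem.List.enumerate ls).foldl
      (fun keep ic => if ic.2 < '0' ∨ '9' < ic.2 then ic.1 + 1 else keep) 0

theorem keepOf_append (ys : List Char) (y : Char) :
    keepOf (ys ++ [y]) =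
      if y < '0' ∨ '9' < y then (ys.length : Int) + 1 else keepOf ys := by
  unfold keepOf
  rw [PySem.List.enumerate_append, List.foldl_append]
  simp [PySem.List.enumerate_cons, PySem.List.enumerate_nil]

-- B's cut index selects exactly the prefix before the trailing digit run
theorem keepOf_take (ls : List Char) :
    ∃ n : Nat, keepOf ls = (n : Int) ∧ n ≤ ls.length ∧
      ls.take n = (ls.reverse.dropWhile (fun c => decide ('0' ≤ c ∧ c ≤ '9'))).reverse := by
  induction ls using List.reverseRecOn with
  | nil => exact ⟨0, by unfold keepOf; simp [PySem.List.enumerate_nil], by simp, by simp⟩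
  | append_singleton ys y ih =>
    obtain ⟨n, hf, hle, htake⟩ := ih
    rw [keepOf_append]
    rw [List.reverse_append, List.reverse_singleton, List.singleton_append,
        List.dropWhile_cons]
    by_cases hy : ('0' ≤ y ∧ y ≤ '9')
    · have hcond : ¬ (y < '0' ∨ '9' < y) := by
        rintro (h | h)
        · exact absurd hy.1 (not_le.mpr h)
        · exact absurd hy.2 (not_le.mpr h)
      refine ⟨n, by rw [if_neg hcond]; exact hf, by simp; omega, ?_⟩
      rw [if_pos (by simpa using hy)]
      rw [List.take_append_of_le_length hle, htake]
    · have hcond : y < '0' ∨ '9' < y := by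
        rcases not_and_or.mp hy with h | h
        · exact Or.inl (not_le.mp h)
        · exact Or.inr (not_le.mp h)
      refine ⟨ys.length + 1, by rw [if_pos hcond]; push_cast; ring, by simp, ?_⟩
      rw [if_neg (by simpa using hy)]
      rw [List.reverse_cons, List.reverse_reverse]
      simp

-- ===== VERDICT (by name: the statement is the Claim_ definition above) =====
theorem removeLastIntegerNumber_spec : Claim_equal_removeLastIntegerNumber := by
  intro node_str _
  unfold Spec_removeLastIntegerNumber removeLastIntegerNumber removeLastIntegerNumber_alt
  simp only [PySem.Str.len_eq]
  obtain ⟨n, hf, _, htake⟩ := keepOf_take node_str.toList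
  have hk : (PySem.List.enumerate node_str.toList).foldl
      (fun keep ic => if ic.2 < '0' ∨ '9' < ic.2 then ic.1 + 1 else keep) 0 = (n : Int) := hf
  rw [go_eq_rstrip, List.map_id', hk, PySem.List.slice_to_natCast, htake]
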